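-- pv_equiv track=rewrite | github.com/lseixas/json_compare_tool | main.py | _group_roots
-- ===== SOURCE A (Python) =====
-- from typing import Any, Dict, Set, List
--
-- def _root_of_path(path: str) -> str:
--     """Retorna a raiz do path (primeiro segmento antes de '.' ou '[').
--
--     Ex: 'ETQ806.assignments[0].name' -> 'ETQ806'
--     """
--     if not path:
--         return path
--     # split by '.' first
--     dot_split = path.split('.', 1)
--     first = dot_split[0]
--     # if the first contains a list index like 'something[0]', return before '['
--     bracket_idx = first.find('[')
--     if bracket_idx != -1:
--         return first[:bracket_idx]
--     return first
--
-- def _group_roots(paths: List[str]) -> List[str]: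
--     """If multiple paths share same root, return only the root once; otherwise keep full path.
--
--     This function reduces a list of paths to a list where if more than one path
--     has the same root, we show the root instead of multiple entries.
--     """
--     roots = {}
--     for p in paths:
--         r = _root_of_path(p)
--         roots.setdefault(r, []).append(p)
--
--     out = []
--     for r, group in sorted(roots.items()):
--         if len(group) > 1:
--             out.append(r)
--         else:
--             out.append(group[0])
--     return out
-- ===== SOURCE B (Python) =====
-- from typing import List
--
--
-- def _root_of_path(path: str) -> str:
--     """Retorna a raiz do path (primeiro segmento antes de '.' ou '[')."""
--     if not path:
--         return path
--     dot_split = path.split('.', 1)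
--     first = dot_split[0]
--     bracket_idx = first.find('[')
--     if bracket_idx != -1:
--         return first[:bracket_idx]
--     return first
--
--
-- def _group_roots(paths: List[str]) -> List[str]:
--     # One pass with a look-ahead: at the first occurrence of each root decide
--     # immediately (root if it recurs later, else the path itself); no groups
--     # are ever materialized.  Sort the (root, entry) pairs at the end.
--     entries = []
--     seen = set()
--     for i, p in enumerate(paths):
--         r = _root_of_path(p)
--         if r not in seen:
--             seen.add(r)
--             entries.append((r, r if any(_root_of_path(q) == r for q in paths[i+1:]) else p))
--     return [e for _, e in sorted(entries, key=lambda t: t[0])]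
-- ===== Notes on version B (the rewrite author's own statement) =====
-- stated objective: alternative
-- what changed: A groups the paths into a dict of per-root lists and then walks sorted(items) checking group sizes; B never builds groups at all: in a single indexed pass it decides each root at its first occurrence by a look-ahead scan (any() over the remaining suffix), recording one (root, entry) pair per distinct root, and finally sorts those pairs.
import Mathlib
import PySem

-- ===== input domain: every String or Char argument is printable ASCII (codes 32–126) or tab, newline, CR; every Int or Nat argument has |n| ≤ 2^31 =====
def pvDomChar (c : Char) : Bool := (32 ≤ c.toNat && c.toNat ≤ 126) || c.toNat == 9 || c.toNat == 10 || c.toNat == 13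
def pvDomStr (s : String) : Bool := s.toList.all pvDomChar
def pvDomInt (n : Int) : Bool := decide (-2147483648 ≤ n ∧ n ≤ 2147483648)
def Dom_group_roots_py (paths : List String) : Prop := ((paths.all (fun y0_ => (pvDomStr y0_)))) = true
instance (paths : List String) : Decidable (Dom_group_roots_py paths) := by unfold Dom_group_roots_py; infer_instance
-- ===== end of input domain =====

-- B drops A's dict of per-root groups: a single indexed pass decides each root at its
-- first occurrence by a look-ahead any() over the remaining suffix, then sorts the
-- (root, entry) pairs; equal output, quadratic look-ahead instead of dict grouping.

-- ===== PORT A =====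
-- shared helper: _root_of_path (used verbatim by both A and B)
def rootOfPath (path : String) : String :=
  if path.toList = [] then path
  else
    let dot_split := (PySem.Str.splitMax? path "." 1).getD []  -- separator "." is nonempty, so splitMax? is never none
    let first := PySem.List.pyGetD dot_split 0 ""              -- split always returns at least one piece, so [0] never raises
    let bracket_idx := PySem.Str.find first "["
    if bracket_idx ≠ -1 then PySem.Str.slice first none (some bracket_idx)
    else first

def group_roots_py (paths : List String) : List String :=
  let roots : PySem.Dict String (List String) :=
    paths.foldl (fun d p => d.modify (rootOfPath p) [] (fun g => g ++ [p])) PySem.Dict.empty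
  (PySem.List.sorted2 roots.items (fun pr => pr.1) (fun pr => pr.2)).foldl
    (fun out rg =>
      if 1 < rg.2.length then out ++ [rg.1]
      else out ++ [PySem.List.pyGetD rg.2 0 ""])   -- every group is nonempty by construction, so group[0] never raises
    []

-- ===== PORT B =====
-- loop body of B's pass: at the first occurrence of a root, decide the entry
-- by a look-ahead over paths[i+1:] (seen-set membership test, list append)
def pvStep (key : String → String) (paths : List String)
    (st : PySem.Set String × List (String × String)) (ip : Int × String) :
    PySem.Set String × List (String × String) :=
  let r := key ip.2
  if PySem.Set.contains st.1 r then st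
  else (PySem.Set.add st.1 r,
    st.2 ++ [(r, if (PySem.List.slice paths (some (ip.1 + 1)) none).any
                    (fun q => key q == r) then r else ip.2)])

-- for i, p in enumerate(paths): ... ; then sort the (root, entry) pairs by root
def group_roots_py_alt (paths : List String) : List String :=
  let st := (PySem.List.enumerate paths).foldl (pvStep rootOfPath paths)
    (PySem.Set.empty, [])
  (PySem.List.sorted st.2 (fun t => t.1)).map (fun t => t.2)

-- ===== PRECONDITION & SPEC =====
def Spec_group_roots_py (paths : List String) (out : List String) : Prop := out = group_roots_py_alt paths
instance (paths : List String) (out : List String) : Decidable (Spec_group_roots_py paths out) := by unfold Spec_group_roots_py; infer_instance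

-- ===== CLAIM (what is proved, stated in full; the proofs are below) =====
def Claim_equal_group_roots_py : Prop := ∀ (paths : List String), Dom_group_roots_py paths → Spec_group_roots_py paths (group_roots_py paths)

-- ===== LEMMAS AND PROOFS =====

-- A's grouping dict: items = first-occurrence roots paired with the filtered groups
theorem pvItems_group (key : String → String) (paths : List String) :
    (paths.foldl (fun d p => d.modify (key p) [] (fun g => g ++ [p])) PySem.Dict.empty).items
      = (PySem.Set.ofList (paths.map key)).map
          (fun r => (r, paths.filter (fun p => key p == r))) := by
  set D := paths.foldl (fun d p => d.modify (key p) [] (fun g => g ++ [p]))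
      (PySem.Dict.empty : PySem.Dict String (List String)) with hD
  have hkeys : D.keys = PySem.Set.ofList (paths.map key) := by
    have := PySem.Dict.keys_foldl_modify_key paths key ([] : List String)
      (fun _ p => (fun g => g ++ [p])) PySem.Dict.empty
    simpa [hD, PySem.Set.update, PySem.Set.ofList, PySem.Dict.empty, PySem.Dict.keys] using this
  have hnd : D.keys.Nodup := by
    rw [hkeys]; exact PySem.Set.nodup_ofList _
  have hgetD : ∀ c, D.getD c [] = paths.filter (fun p => key p == c) := by
    intro c
    have h1 : D = (paths.map (fun p => (key p, p))).foldl
        (fun d pr => d.modify pr.1 [] (fun g => g ++ [pr.2])) PySem.Dict.empty := by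
      rw [hD, List.foldl_map]
    rw [h1, PySem.Dict.getD_foldl_modify_append]
    simp [List.filter_map, List.map_map, Function.comp_def, PySem.Dict.getD, PySem.Dict.get?,
      PySem.Dict.empty]
  rw [PySem.Dict.items_eq_map_keys D hnd [], hkeys]
  exact List.map_congr_left (fun r _ => by rw [hgetD r])

theorem pvInsertBy_congr {α : Type} (p q : α → α → Bool) (x : α) :
    ∀ ys : List α, (∀ y ∈ ys, p x y = q x y) →
      PySem.List.insertBy p x ys = PySem.List.insertBy q x ys := by
  intro ys
  induction ys with
  | nil => intro; rfl
  | cons y ys ih =>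
    intro h
    have hy : p x y = q x y := h y (by simp)
    simp only [PySem.List.insertBy, hy]
    by_cases hq : q x y = true
    · simp [hq]
    · simp only [hq]
      rw [ih (fun z hz => h z (by simp [hz]))]

theorem pvFoldl_insertBy_congr {α : Type} (p q : α → α → Bool) (S : List α)
    (hpq : ∀ a ∈ S, ∀ b ∈ S, a ≠ b → p a b = q a b) :
    ∀ (l acc : List α), (∀ x ∈ l, x ∈ S) → (∀ y ∈ acc, y ∈ S) → (∀ x ∈ l, x ∉ acc) → l.Nodup →
      l.foldl (fun acc x => PySem.List.insertBy p x acc) acc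
        = l.foldl (fun acc x => PySem.List.insertBy q x acc) acc := by
  intro l
  induction l with
  | nil => intros; rfl
  | cons x t ih =>
    intro acc hl hacc hdisj hnd
    have hx : x ∈ S := hl x (by simp)
    have hins : PySem.List.insertBy p x acc = PySem.List.insertBy q x acc := by
      refine pvInsertBy_congr p q x acc (fun y hy => hpq x hx y (hacc y hy) ?_)
      intro hEq
      exact hdisj x (by simp) (by rw [hEq]; exact hy)
    simp only [List.foldl_cons, hins]
    refine ih (PySem.List.insertBy q x acc) (fun z hz => hl z (by simp [hz])) ?_ ?_
      (List.nodup_cons.mp hnd).2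
    · intro y hy
      rcases (PySem.List.mem_insertBy _ _ _ _).mp hy with rfl | hy
      · exact hx
      · exact hacc y hy
    · intro z hz hzin
      rcases (PySem.List.mem_insertBy _ _ _ _).mp hzin with rfl | hzin
      · exact (List.nodup_cons.mp hnd).1 hz
      · exact hdisj z (by simp [hz]) hzin

-- keys are distinct, so Python's tuple comparison in sorted(items) only ever reads the first component
theorem pvSorted2_eq_sorted (xs : List (String × List String))
    (h : (xs.map Prod.fst).Nodup) :
    PySem.List.sorted2 xs (fun pr => pr.1) (fun pr => pr.2)
      = PySem.List.sorted xs (fun pr => pr.1) := by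
  have hnd : xs.Nodup := h.of_map
  have hinj : ∀ a ∈ xs, ∀ b ∈ xs, a.1 = b.1 → a = b := List.inj_on_of_nodup_map h
  simp only [PySem.List.sorted2, PySem.List.sorted, if_neg (by simp : ¬(false = true))]
  refine pvFoldl_insertBy_congr _ _ xs ?_ xs [] (fun _ h => h) (by simp) (by simp) hnd
  intro a ha b hb hab
  have h1 : a.1 ≠ b.1 := fun hEq => hab (hinj a ha b hb hEq)
  by_cases hlt : a.1 < b.1
  · simp [hlt]
  · have hgt : b.1 < a.1 := (lt_or_gt_of_ne h1).resolve_left hlt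
    simp [hlt, hgt]

-- fold of two-branch appends is a map
theorem pvFoldl_append_ite {α β : Type} (c : α → Prop) [DecidablePred c] (f g : α → β)
    (l : List α) (acc : List β) :
    l.foldl (fun out x => if c x then out ++ [f x] else out ++ [g x]) acc
      = acc ++ l.map (fun x => if c x then f x else g x) := by
  have h : (fun (out : List β) x => if c x then out ++ [f x] else out ++ [g x])
      = fun out x => out ++ [if c x then f x else g x] := by
    funext o x; split <;> rfl
  rw [h, PySem.List.foldl_append_singleton_eq_map]


-- the roots B's pass records: first occurrences not yet seen, in order
def pvNewRoots (key : String → String) : PySem.Set String → List String → List String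
  | _, [] => []
  | seen, p :: t =>
    if PySem.Set.contains seen (key p) then pvNewRoots key seen t
    else key p :: pvNewRoots key (PySem.Set.add seen (key p)) t

theorem pvSeen_append (key : String → String) :
    ∀ (l : List String) (seen : PySem.Set String),
      seen ++ pvNewRoots key seen l = (l.map key).foldl PySem.Set.add seen := by
  intro l
  induction l with
  | nil => intro seen; simp [pvNewRoots]
  | cons p t ih =>
    intro seen
    by_cases hc : PySem.Set.contains seen (key p) = true
    · have hadd : PySem.Set.add seen (key p) = seen := by
        simp only [PySem.Set.add]; rw [if_pos hc]
      have h3 : pvNewRoots key seen (p :: t) = pvNewRoots key seen t := by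
        simp only [pvNewRoots]; rw [if_pos hc]
      rw [h3, List.map_cons, List.foldl_cons, hadd]
      exact ih seen
    · have hadd : PySem.Set.add seen (key p) = seen ++ [key p] := by
        simp only [PySem.Set.add]; rw [if_neg hc]
      have h3 : pvNewRoots key seen (p :: t)
          = key p :: pvNewRoots key (PySem.Set.add seen (key p)) t := by
        simp only [pvNewRoots]; rw [if_neg hc]
      rw [h3, List.map_cons, List.foldl_cons, ← ih (PySem.Set.add seen (key p)), hadd]
      simp

-- B's per-root entry, written over the full path list (the form A's output takes too)
def pvEntry (key : String → String) (paths : List String) (r : String) : String :=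
  if 1 < (paths.filter (fun p => key p == r)).length then r
  else PySem.List.pyGetD (paths.filter (fun p => key p == r)) 0 ""

-- invariant of B's indexed pass over the suffix l of paths (pre already processed)
theorem pvBFold (key : String → String) (paths : List String) :
    ∀ (l pre : List String), paths = pre ++ l → ∀ (out : List (String × String)),
      ((PySem.List.enumerate l (pre.length : Int)).foldl (pvStep key paths)
        (PySem.Set.ofList (pre.map key), out)).2
      = out ++ (pvNewRoots key (PySem.Set.ofList (pre.map key)) l).map
          (fun r => (r, pvEntry key paths r)) := by
  intro l
  induction l with
  | nil => intro pre _ out; simp [PySem.List.enumerate, pvNewRoots]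
  | cons p t ih =>
    intro pre hpaths out
    set seen := PySem.Set.ofList (pre.map key) with hseen
    have hlen : ((pre.length : Int) + 1) = (((pre ++ [p]).length : Nat) : Int) := by
      simp
    have hseen' : PySem.Set.ofList ((pre ++ [p]).map key) = PySem.Set.add seen (key p) := by
      simp only [hseen, PySem.Set.ofList, List.map_append, List.foldl_append]
      rfl
    have hpaths' : paths = (pre ++ [p]) ++ t := by rw [hpaths]; simp
    rw [PySem.List.enumerate_cons, List.foldl_cons]
    by_cases hc : PySem.Set.contains seen (key p) = true
    · have hadd : PySem.Set.add seen (key p) = seen := by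
        simp only [PySem.Set.add]; rw [if_pos hc]
      have h1 : pvStep key paths (seen, out) ((pre.length : Int), p) = (seen, out) := by
        simp only [pvStep]; rw [if_pos hc]
      have h3 : pvNewRoots key seen (p :: t) = pvNewRoots key seen t := by
        simp only [pvNewRoots]; rw [if_pos hc]
      rw [h1, hlen]
      have h2 := ih (pre ++ [p]) hpaths' out
      rw [hseen', hadd] at h2
      rw [h2, h3]
    · have hadd : PySem.Set.add seen (key p) = seen ++ [key p] := by
        simp only [PySem.Set.add]; rw [if_neg hc]
      -- the look-ahead slice is exactly the tail t
      have hslice : PySem.List.slice paths (some ((pre.length : Int) + 1)) none = t := by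
        rw [hlen, PySem.List.slice_from_natCast, hpaths']
        simp
      -- the entry chosen at the first occurrence is pvEntry over the full list
      have hnotpre : ∀ q ∈ pre, ¬ (key q == key p) = true := by
        intro q hq hkq
        apply hc
        have h4 : key p ∈ PySem.Set.ofList (pre.map key) :=
          (PySem.Set.mem_ofList _ _).mpr (List.mem_map.mpr ⟨q, hq, by simpa using hkq⟩)
        simp only [hseen, PySem.Set.contains]
        simpa using h4
      have hfil : paths.filter (fun q => key q == key p)
          = p :: t.filter (fun q => key q == key p) := by
        rw [hpaths, List.filter_append]
        rw [List.filter_eq_nil_iff.mpr hnotpre]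
        simp
      have hentry : (if t.any (fun q => key q == key p) then key p else p)
          = pvEntry key paths (key p) := by
        by_cases ha : t.any (fun q => key q == key p) = true
        · obtain ⟨z, hz, hkz⟩ := List.any_eq_true.mp ha
          have hzf : z ∈ t.filter (fun q => key q == key p) := List.mem_filter.mpr ⟨hz, hkz⟩
          have hlt : 1 < (paths.filter (fun q => key q == key p)).length := by
            rw [hfil]
            have := List.length_pos_of_mem hzf
            simp only [List.length_cons]
            omega
          rw [if_pos ha]
          simp only [pvEntry]
          rw [if_pos hlt]
        · have hft : t.filter (fun q => key q == key p) = [] := by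
            rw [List.filter_eq_nil_iff]
            intro z hz hkz
            exact ha (List.any_eq_true.mpr ⟨z, hz, hkz⟩)
          have hone : paths.filter (fun q => key q == key p) = [p] := by rw [hfil, hft]
          rw [if_neg ha]
          simp [pvEntry, hone, PySem.List.pyGetD, PySem.List.pyGet?, PySem.List.pyIdx?]
      have h1 : pvStep key paths (seen, out) ((pre.length : Int), p)
          = (seen ++ [key p], out ++ [(key p, pvEntry key paths (key p))]) := by
        simp only [pvStep]
        rw [if_neg hc, hadd, hslice, hentry]
      have h3 : pvNewRoots key seen (p :: t)
          = key p :: pvNewRoots key (PySem.Set.add seen (key p)) t := by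
        simp only [pvNewRoots]; rw [if_neg hc]
      rw [h1, hlen]
      have h2 := ih (pre ++ [p]) hpaths' (out ++ [(key p, pvEntry key paths (key p))])
      rw [hseen', hadd] at h2
      rw [h2, h3, hadd]
      simp

-- ===== VERDICT (by name: the statement is the Claim_ definition above) =====
theorem group_roots_py_spec : Claim_equal_group_roots_py := by
  unfold Claim_equal_group_roots_py
  intro paths _
  unfold Spec_group_roots_py
  set key := rootOfPath with hkey
  set R := PySem.Set.ofList (paths.map key) with hR
  set V : String → String := pvEntry key paths with hV
  set F : String → String × String := fun r => (r, V r) with hF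
  -- A side: sorted distinct roots, mapped through the group test
  set FA : String → String × List String := fun r => (r, paths.filter (fun p => key p == r)) with hFA
  have hitems : (paths.foldl (fun d p => d.modify (key p) [] (fun g => g ++ [p]))
      PySem.Dict.empty).items = R.map FA := pvItems_group key paths
  have hfstnd : ((R.map FA).map Prod.fst).Nodup := by
    have : (R.map FA).map Prod.fst = R := by
      simp [hFA, List.map_map, Function.comp_def]
    rw [this, hR]
    exact PySem.Set.nodup_ofList _
  have hsortedA : PySem.List.sorted (R.map FA) (fun pr => pr.1)
      = (PySem.List.sorted R (fun x => x)).map FA := by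
    refine PySem.List.sorted_eq_of_perm_of_pairwise_lt _ _ _ ?_ ?_
    · exact (PySem.List.sorted_perm R _ false).map FA
    · refine List.pairwise_map.mpr ?_
      simp only [hFA]
      rw [hR]
      exact PySem.List.sorted_ofList_pairwise_lt _
  have hA : group_roots_py paths = (PySem.List.sorted R (fun x => x)).map V := by
    show (PySem.List.sorted2 (paths.foldl (fun d p => d.modify (key p) [] (fun g => g ++ [p]))
        PySem.Dict.empty).items (fun pr => pr.1) (fun pr => pr.2)).foldl
        (fun out rg => if 1 < rg.2.length then out ++ [rg.1]
          else out ++ [PySem.List.pyGetD rg.2 0 ""]) [] = _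
    rw [hitems, pvSorted2_eq_sorted _ hfstnd, hsortedA,
      pvFoldl_append_ite (fun rg : String × List String => 1 < rg.2.length) _ _ _ []]
    simp only [List.nil_append, List.map_map]
    exact List.map_congr_left (fun r _ => by simp [hFA, hV, pvEntry])
  -- B side: the indexed pass collects exactly the (root, entry) pairs of R
  have hnr : pvNewRoots key ([] : PySem.Set String) paths = R := by
    have h := pvSeen_append key paths ([] : PySem.Set String)
    simp only [List.nil_append] at h
    rw [h, hR]
    simp [PySem.Set.ofList, PySem.Set.empty]
  have hentries : ((PySem.List.enumerate paths).foldl (pvStep key paths)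
      (PySem.Set.empty, [])).2
      = (pvNewRoots key ([] : PySem.Set String) paths).map
          (fun r => (r, pvEntry key paths r)) :=
    pvBFold key paths paths [] rfl []
  have hsortedB : PySem.List.sorted (R.map F) (fun t => t.1)
      = (PySem.List.sorted R (fun x => x)).map F := by
    refine PySem.List.sorted_eq_of_perm_of_pairwise_lt _ _ _ ?_ ?_
    · exact (PySem.List.sorted_perm R _ false).map F
    · refine List.pairwise_map.mpr ?_
      simp only [hF]
      rw [hR]
      exact PySem.List.sorted_ofList_pairwise_lt _
  have hB : group_roots_py_alt paths = (PySem.List.sorted R (fun x => x)).map V := by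
    show (PySem.List.sorted ((PySem.List.enumerate paths).foldl (pvStep key paths)
        (PySem.Set.empty, [])).2 (fun t : String × String => t.1)).map
        (fun t : String × String => t.2) = _
    rw [hentries, hnr, hsortedB, List.map_map]
    exact List.map_congr_left (fun r _ => by simp [hF])
  rw [hA, hB]
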